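-- pv_equiv track=rewrite | github.com/maureenkichor19-dev/trying | app/services/internet_rag_service.py | _smart_chunk_text
-- ===== SOURCE A (Python) =====
-- from typing import List, Dict, Tuple, Optional, Any
--
-- def _smart_chunk_text(text: str, chunk_size: int = 800, max_chunk_size: int = 1200) -> List[str]:
--     """
--     Split text into chunks, preserving paragraph boundaries.
--
--     Args:
--         text: The text to chunk
--         chunk_size: Target chunk size
--         max_chunk_size: Maximum chunk size before forcing split
--
--     Returns:
--         List of text chunks
--     """
--     if not text:
--         return []
--
--     # Split into paragraphs
--     paragraphs = text.split("\n\n")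
--     chunks = []
--     current_chunk = []
--     current_size = 0
--
--     for para in paragraphs:
--         para = para.strip()
--         if not para:
--             continue
--
--         para_size = len(para)
--
--         # If single paragraph is too large, split by sentences
--         if para_size > max_chunk_size:
--             sentences = para.split(". ")
--             for sent in sentences:
--                 sent = sent.strip()
--                 if not sent:
--                     continue
--
--                 # Only add period if sentence doesn't already end with one
--                 if not sent.endswith("."):
--                     sent = sent + "."
--                 sent_size = len(sent) + 1  # Account for space separator
--
--                 if current_size + sent_size > max_chunk_size:
--                     if current_chunk:
--                         chunks.append(" ".join(current_chunk))
--                     current_chunk = [sent]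
--                     current_size = sent_size
--                 else:
--                     current_chunk.append(sent)
--                     current_size += sent_size
--         else:
--             # Check if adding this paragraph would exceed max size
--             if current_size + para_size > max_chunk_size:
--                 if current_chunk:
--                     chunks.append("\n\n".join(current_chunk))
--                 current_chunk = [para]
--                 current_size = para_size
--             elif current_size + para_size > chunk_size and current_chunk:
--                 # Exceeded target size, start new chunk
--                 chunks.append("\n\n".join(current_chunk))
--                 current_chunk = [para]
--                 current_size = para_size
--             else:
--                 current_chunk.append(para)
--                 current_size += para_size + 2  # Account for \n\n
--
--     # Add remaining content
--     if current_chunk: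
--         chunks.append("\n\n".join(current_chunk))
--
--     return chunks
-- ===== SOURCE B (Python) =====
-- def _unit_table(text, max_chunk_size):
--     """Tokenize into records (piece, test_size, append_increment, flush_separator, is_paragraph)."""
--     units = []
--     for para in map(str.strip, text.split("\n\n")):
--         if not para:
--             continue
--         if len(para) > max_chunk_size:
--             for sent in map(str.strip, para.split(". ")):
--                 if sent:
--                     s = sent if sent.endswith(".") else sent + "."
--                     units.append((s, len(s) + 1, len(s) + 1, " ", False))
--         else:
--             units.append((para, len(para), len(para) + 2, "\n\n", True))
--     return units
--
--
-- def _cut_points(units, chunk_size, max_chunk_size):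
--     """Compute chunk boundaries as (start, end, separator) index triples; no piece lists kept."""
--     cuts = []
--     start, size = 0, 0
--     for i, (piece, need, inc, sep, is_para) in enumerate(units):
--         if size + need > max_chunk_size or (is_para and size + need > chunk_size and start < i):
--             if start < i:
--                 cuts.append((start, i, sep))
--             start, size = i, need
--         else:
--             size += inc
--     if start < len(units):
--         cuts.append((start, len(units), "\n\n"))
--     return cuts
--
--
-- def _smart_chunk_text(text: str, chunk_size: int = 800, max_chunk_size: int = 1200):
--     """Three-phase rewrite: unit table -> boundary indices -> render chunks by slicing."""
--     if not text:
--         return []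
--     units = _unit_table(text, max_chunk_size)
--     cuts = _cut_points(units, chunk_size, max_chunk_size)
--     return [sep.join(u[0] for u in units[a:b]) for a, b, sep in cuts]
-- ===== Notes on version B (the rewrite author's own statement) =====
-- stated objective: alternative
-- what changed: B replaces A's single nested loop that grows a current-chunk piece list with three separate phases: a tokenizer building a unit table with precomputed sizes/increments/separators, a boundary scan that maintains only a start index and records (start, end, separator) cut triples, and a final render that slices the table per cut and joins.
import Mathlib
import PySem

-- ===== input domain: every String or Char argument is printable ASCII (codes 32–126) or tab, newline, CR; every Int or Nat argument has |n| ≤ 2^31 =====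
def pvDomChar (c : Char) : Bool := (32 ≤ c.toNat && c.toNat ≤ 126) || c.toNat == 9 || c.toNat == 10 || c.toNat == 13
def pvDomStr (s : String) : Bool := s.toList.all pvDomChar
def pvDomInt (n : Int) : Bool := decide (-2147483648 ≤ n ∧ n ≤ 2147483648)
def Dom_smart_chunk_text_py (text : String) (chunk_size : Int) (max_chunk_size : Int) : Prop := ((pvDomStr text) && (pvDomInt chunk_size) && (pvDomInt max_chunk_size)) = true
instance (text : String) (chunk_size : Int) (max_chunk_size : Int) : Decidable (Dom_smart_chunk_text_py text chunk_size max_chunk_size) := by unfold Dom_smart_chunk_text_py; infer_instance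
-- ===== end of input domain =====

-- B re-implements A in three phases — a unit table with precomputed sizes/separators, a boundary-index scan that keeps only cut positions (no piece lists), and a final render by slicing — instead of A's single nested loop with a growing current-chunk list; alternative decomposition, same cost.


-- ===== PORT A =====
-- Literal transliteration of A's single pass with nested sentence loop; strings handled on List Char.
def smart_chunk_text_py (text : String) (chunk_size : Int) (max_chunk_size : Int) : List String :=
  if text = "" then [] else
  let paragraphs := PySem.Chars.splitOn text.toList ['\n', '\n']
  let st : List (List Char) × List (List Char) × Int :=
    paragraphs.foldl (fun st para =>
      let para := PySem.Chars.strip para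
      if para = [] then st else
      let para_size : Int := para.length
      if para_size > max_chunk_size then
        (PySem.Chars.splitOn para ['.', ' ']).foldl (fun st sent =>
          let (chunks, current_chunk, current_size) := st
          let sent := PySem.Chars.strip sent
          if sent = [] then (chunks, current_chunk, current_size) else
          let sent := if PySem.Chars.endswith sent ['.'] then sent else sent ++ ['.']
          let sent_size : Int := (sent.length : Int) + 1
          if current_size + sent_size > max_chunk_size then
            ((if current_chunk ≠ [] then chunks ++ [PySem.Chars.join [' '] current_chunk] else chunks),
             [sent], sent_size)
          else
            (chunks, current_chunk ++ [sent], current_size + sent_size)) st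
      else
        let (chunks, current_chunk, current_size) := st
        if current_size + para_size > max_chunk_size then
          ((if current_chunk ≠ [] then chunks ++ [PySem.Chars.join ['\n', '\n'] current_chunk] else chunks),
           [para], para_size)
        else if current_size + para_size > chunk_size ∧ current_chunk ≠ [] then
          (chunks ++ [PySem.Chars.join ['\n', '\n'] current_chunk], [para], para_size)
        else
          (chunks, current_chunk ++ [para], current_size + para_size + 2)) ([], [], 0)
  let (chunks, current_chunk, _) := st
  (if current_chunk ≠ [] then chunks ++ [PySem.Chars.join ['\n', '\n'] current_chunk] else chunks).map String.ofList

-- ===== PORT B =====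
-- A unit record: (piece, test size, append increment, flush separator, is_paragraph).
abbrev pvUnit : Type := List Char × Int × Int × List Char × Bool

-- Phase 1 of B (_unit_table): tokenize into unit records.
def pvUnits (max_chunk_size : Int) (text : List Char) : List pvUnit :=
  (PySem.Chars.splitOn text ['\n', '\n']).flatMap (fun para =>
    let para := PySem.Chars.strip para
    if para = [] then []
    else if (para.length : Int) > max_chunk_size then
      (PySem.Chars.splitOn para ['.', ' ']).filterMap (fun sent =>
        let sent := PySem.Chars.strip sent
        if sent = [] then none
        else
          let s := if PySem.Chars.endswith sent ['.'] then sent else sent ++ ['.']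
          some (s, (s.length : Int) + 1, (s.length : Int) + 1, [' '], false))
    else [(para, (para.length : Int), (para.length : Int) + 2, ['\n', '\n'], true)])

-- Phase 2 of B (_cut_points): one enumerate step maintaining only (cuts, start index, size).
def pvCutStep (chunk_size max_chunk_size : Int)
    (st : List (Nat × Nat × List Char) × Nat × Int) (ui : pvUnit × Nat) :
    List (Nat × Nat × List Char) × Nat × Int :=
  let (cuts, start, size) := st
  let ((_piece, need, inc, sep, is_para), i) := ui
  if size + need > max_chunk_size ∨ (is_para = true ∧ size + need > chunk_size ∧ start < i) then
    ((if start < i then cuts ++ [(start, i, sep)] else cuts), i, need)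
  else (cuts, start, size + inc)

-- Phase 3 of B: render one cut (start, end, sep) by slicing the unit table.
def pvRender (units : List pvUnit) (c : Nat × Nat × List Char) : List Char :=
  PySem.Chars.join c.2.2 (((units.drop c.1).take (c.2.1 - c.1)).map (·.1))

def smart_chunk_text_py_alt (text : String) (chunk_size : Int) (max_chunk_size : Int) : List String :=
  if text = "" then [] else
  let units := pvUnits max_chunk_size text.toList
  let st := (units.zipIdx).foldl (pvCutStep chunk_size max_chunk_size) ([], 0, 0)
  let cuts := if st.2.1 < units.length then st.1 ++ [(st.2.1, units.length, ['\n', '\n'])] else st.1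
  cuts.map (fun c => String.ofList (pvRender units c))

-- ===== PRECONDITION & SPEC =====
def Spec_smart_chunk_text_py (text : String) (chunk_size : Int) (max_chunk_size : Int) (out : List String) : Prop := out = smart_chunk_text_py_alt text chunk_size max_chunk_size
instance (text : String) (chunk_size : Int) (max_chunk_size : Int) (out : List String) : Decidable (Spec_smart_chunk_text_py text chunk_size max_chunk_size out) := by unfold Spec_smart_chunk_text_py; infer_instance

-- ===== CLAIM (what is proved, stated in full; the proofs are below) =====
def Claim_equal_smart_chunk_text_py : Prop := ∀ (text : String) (chunk_size : Int) (max_chunk_size : Int), Dom_smart_chunk_text_py text chunk_size max_chunk_size → Spec_smart_chunk_text_py text chunk_size max_chunk_size (smart_chunk_text_py text chunk_size max_chunk_size)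

-- ===== LEMMAS AND PROOFS =====

-- Proof-side uniform step: A's per-unit behaviour expressed on unit records.
def pvStepA (chunk_size max_chunk_size : Int)
    (st : List (List Char) × List (List Char) × Int) (u : pvUnit) :
    List (List Char) × List (List Char) × Int :=
  let (chunks, cur, size) := st
  let (piece, need, inc, sep, is_para) := u
  if size + need > max_chunk_size ∨ (is_para = true ∧ size + need > chunk_size ∧ cur ≠ []) then
    ((if cur ≠ [] then chunks ++ [PySem.Chars.join sep cur] else chunks), [piece], need)
  else (chunks, cur ++ [piece], size + inc)

theorem pvStepA_def (cs mx : Int) (chunks cur : List (List Char)) (size : Int) (u : pvUnit) :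
    pvStepA cs mx (chunks, cur, size) u =
      if size + u.2.1 > mx ∨ (u.2.2.2.2 = true ∧ size + u.2.1 > cs ∧ cur ≠ []) then
        ((if cur ≠ [] then chunks ++ [PySem.Chars.join u.2.2.2.1 cur] else chunks), [u.1], u.2.1)
      else (chunks, cur ++ [u.1], size + u.2.2.1) := by
  obtain ⟨p, n, i, s, b⟩ := u; rfl

theorem pvCutStep_def (cs mx : Int) (cuts : List (Nat × Nat × List Char)) (start : Nat) (size : Int)
    (u : pvUnit) (i : Nat) :
    pvCutStep cs mx (cuts, start, size) (u, i) =
      if size + u.2.1 > mx ∨ (u.2.2.2.2 = true ∧ size + u.2.1 > cs ∧ start < i) then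
        ((if start < i then cuts ++ [(start, i, u.2.2.2.1)] else cuts), i, u.2.1)
      else (cuts, start, size + u.2.2.1) := by
  obtain ⟨p, n, j, s, b⟩ := u; rfl

-- foldl of a guarded step is foldl of the plain step over the filterMapped list.
theorem pv_foldl_filterMap {α β γ : Type} (g : α → Option β) (f : γ → β → γ) (F : γ → α → γ)
    (hF : ∀ st a, F st a = (g a).elim st (f st)) :
    ∀ (l : List α) (st : γ), l.foldl F st = (l.filterMap g).foldl f st := by
  intro l
  induction l with
  | nil => intro st; rfl
  | cons a t ih =>
    intro st
    rw [List.foldl_cons, List.filterMap_cons, hF]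
    cases hg : g a <;> simp [ih]

theorem pv_foldl_flatMap {α β γ : Type} (g : α → List β) (f : γ → β → γ) (l : List α) (s : γ) :
    (l.flatMap g).foldl f s = l.foldl (fun s x => (g x).foldl f s) s := by
  induction l generalizing s with
  | nil => rfl
  | cons a t ih => simp [List.flatMap_cons, List.foldl_append, ih]

-- A's inner sentence loop over one paragraph is the uniform step fold over that paragraph's sentence units.
theorem pv_sent_loop_eq (chunk_size max_chunk_size : Int) (sents : List (List Char))
    (st : List (List Char) × List (List Char) × Int) :
    sents.foldl (fun st sent =>
        let (chunks, current_chunk, current_size) := st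
        let sent := PySem.Chars.strip sent
        if sent = [] then (chunks, current_chunk, current_size) else
        let sent := if PySem.Chars.endswith sent ['.'] then sent else sent ++ ['.']
        let sent_size : Int := (sent.length : Int) + 1
        if current_size + sent_size > max_chunk_size then
          ((if current_chunk ≠ [] then chunks ++ [PySem.Chars.join [' '] current_chunk] else chunks),
           [sent], sent_size)
        else
          (chunks, current_chunk ++ [sent], current_size + sent_size)) st
      = (sents.filterMap (fun sent =>
          let sent := PySem.Chars.strip sent
          if sent = [] then none
          else
            let s := if PySem.Chars.endswith sent ['.'] then sent else sent ++ ['.']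
            some ((s, (s.length : Int) + 1, (s.length : Int) + 1, [' '], false) : pvUnit))).foldl
          (pvStepA chunk_size max_chunk_size) st := by
  refine pv_foldl_filterMap _ _ _ ?_ sents st
  rintro ⟨chunks, cur, sz⟩ s
  by_cases h : PySem.Chars.strip s = [] <;> simp [h, pvStepA]

-- A's outer loop body on one paragraph is the uniform step fold over that paragraph's units.
theorem pv_para_body_eq (chunk_size max_chunk_size : Int) (para : List Char)
    (st : List (List Char) × List (List Char) × Int) :
    (let para := PySem.Chars.strip para
     if para = [] then st else
     let para_size : Int := para.length
     if para_size > max_chunk_size then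
       (PySem.Chars.splitOn para ['.', ' ']).foldl (fun st sent =>
         let (chunks, current_chunk, current_size) := st
         let sent := PySem.Chars.strip sent
         if sent = [] then (chunks, current_chunk, current_size) else
         let sent := if PySem.Chars.endswith sent ['.'] then sent else sent ++ ['.']
         let sent_size : Int := (sent.length : Int) + 1
         if current_size + sent_size > max_chunk_size then
           ((if current_chunk ≠ [] then chunks ++ [PySem.Chars.join [' '] current_chunk] else chunks),
            [sent], sent_size)
         else
           (chunks, current_chunk ++ [sent], current_size + sent_size)) st
     else
       let (chunks, current_chunk, current_size) := st
       if current_size + para_size > max_chunk_size then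
         ((if current_chunk ≠ [] then chunks ++ [PySem.Chars.join ['\n', '\n'] current_chunk] else chunks),
          [para], para_size)
       else if current_size + para_size > chunk_size ∧ current_chunk ≠ [] then
         (chunks ++ [PySem.Chars.join ['\n', '\n'] current_chunk], [para], para_size)
       else
         (chunks, current_chunk ++ [para], current_size + para_size + 2))
    = ((let para := PySem.Chars.strip para
        if para = [] then []
        else if (para.length : Int) > max_chunk_size then
          (PySem.Chars.splitOn para ['.', ' ']).filterMap (fun sent =>
            let sent := PySem.Chars.strip sent
            if sent = [] then none
            else
              let s := if PySem.Chars.endswith sent ['.'] then sent else sent ++ ['.']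
              some (s, (s.length : Int) + 1, (s.length : Int) + 1, [' '], false))
        else [(para, (para.length : Int), (para.length : Int) + 2, ['\n', '\n'], true)]) : List pvUnit).foldl
        (pvStepA chunk_size max_chunk_size) st := by
  by_cases h : PySem.Chars.strip para = []
  · simp [h]
  · by_cases h2 : ((PySem.Chars.strip para).length : Int) > max_chunk_size
    · simpa [h, h2] using pv_sent_loop_eq chunk_size max_chunk_size
        (PySem.Chars.splitOn (PySem.Chars.strip para) ['.', ' ']) st
    · obtain ⟨chunks, cur, sz⟩ := st
      by_cases h3 : sz + ((PySem.Chars.strip para).length : Int) > max_chunk_size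
      · simp [h, h2, h3, pvStepA]
      · by_cases h4 : sz + ((PySem.Chars.strip para).length : Int) > chunk_size ∧ cur ≠ []
        · simp [h, h2, h3, h4.1, h4.2, pvStepA]
        · simp [h, h2, h3, h4, pvStepA]
          ring

-- A's whole outer loop equals the uniform step fold over the whole unit table.
theorem pv_outer_eq (chunk_size max_chunk_size : Int) (text : List Char)
    (st : List (List Char) × List (List Char) × Int) :
    (PySem.Chars.splitOn text ['\n', '\n']).foldl (fun st para =>
      let para := PySem.Chars.strip para
      if para = [] then st else
      let para_size : Int := para.length
      if para_size > max_chunk_size then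
        (PySem.Chars.splitOn para ['.', ' ']).foldl (fun st sent =>
          let (chunks, current_chunk, current_size) := st
          let sent := PySem.Chars.strip sent
          if sent = [] then (chunks, current_chunk, current_size) else
          let sent := if PySem.Chars.endswith sent ['.'] then sent else sent ++ ['.']
          let sent_size : Int := (sent.length : Int) + 1
          if current_size + sent_size > max_chunk_size then
            ((if current_chunk ≠ [] then chunks ++ [PySem.Chars.join [' '] current_chunk] else chunks),
             [sent], sent_size)
          else
            (chunks, current_chunk ++ [sent], current_size + sent_size)) st
      else
        let (chunks, current_chunk, current_size) := st
        if current_size + para_size > max_chunk_size then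
          ((if current_chunk ≠ [] then chunks ++ [PySem.Chars.join ['\n', '\n'] current_chunk] else chunks),
           [para], para_size)
        else if current_size + para_size > chunk_size ∧ current_chunk ≠ [] then
          (chunks ++ [PySem.Chars.join ['\n', '\n'] current_chunk], [para], para_size)
        else
          (chunks, current_chunk ++ [para], current_size + para_size + 2)) st
    = (pvUnits max_chunk_size text).foldl (pvStepA chunk_size max_chunk_size) st := by
  unfold pvUnits
  rw [pv_foldl_flatMap]
  induction (PySem.Chars.splitOn text ['\n', '\n']) generalizing st with
  | nil => rfl
  | cons p t ih =>
    simp only [List.foldl_cons]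
    rw [pv_para_body_eq]
    exact ih _

-- cur nonempty on the A side ↔ start strictly before the position on the B side.
theorem pv_cur_ne (done : List pvUnit) (start : Nat) (h : start ≤ done.length) :
    ((done.drop start).map (·.1) ≠ []) ↔ start < done.length := by
  simp [List.drop_eq_nil_iff]

-- slicing the full table from a cut inside the processed prefix yields exactly the A-side buffer
theorem pv_slice_eq (done rest : List pvUnit) (start : Nat) (h : start ≤ done.length) :
    ((done ++ rest).drop start).take (done.length - start) = done.drop start := by
  rw [List.drop_append_of_le_length h]
  exact List.take_left' (by simp [List.length_drop])

-- Main relation: the A-side fold plus its final flush equals the rendered cut list.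
theorem pv_rel (cs mx : Int) (all : List pvUnit) :
    ∀ (us done : List pvUnit) (cuts : List (Nat × Nat × List Char)) (start : Nat) (size : Int),
    all = done ++ us → start ≤ done.length →
    (let stA := us.foldl (pvStepA cs mx) (cuts.map (pvRender all), (done.drop start).map (·.1), size)
     if stA.2.1 ≠ [] then stA.1 ++ [PySem.Chars.join ['\n', '\n'] stA.2.1] else stA.1)
    = (let stB := (us.zipIdx done.length).foldl (pvCutStep cs mx) (cuts, start, size)
       (if stB.2.1 < all.length then stB.1 ++ [(stB.2.1, all.length, ['\n', '\n'])] else stB.1).map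
         (pvRender all)) := by
  intro us
  induction us with
  | nil =>
    intro done cuts start size hall hle
    subst hall
    simp only [List.append_nil] at *
    by_cases hlt : start < done.length
    · have hc : ((done.drop start).map (·.1)) ≠ [] := (pv_cur_ne done start hle).2 hlt
      simp only [List.foldl_nil, List.zipIdx_nil, hc, hlt, if_pos, ne_eq, not_false_iff]
      rw [List.map_append]
      congr 1
      simp only [List.map_cons, List.map_nil, pvRender]
      rw [show (done.drop start).take (done.length - start) = done.drop start from
        by have := pv_slice_eq done [] start hle; simpa using this]
    · have hc : ¬ ((done.drop start).map (·.1)) ≠ [] := fun hx => hlt ((pv_cur_ne done start hle).1 hx)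
      simp [List.foldl_nil, hlt]
  | cons u us2 ih =>
    intro done cuts start size hall hle
    have hall2 : all = (done ++ [u]) ++ us2 := by simp [hall]
    have hcur := pv_cur_ne done start hle
    simp only [List.zipIdx_cons, List.foldl_cons, pvStepA_def, pvCutStep_def]
    by_cases hC : size + u.2.1 > mx ∨ (u.2.2.2.2 = true ∧ size + u.2.1 > cs ∧ start < done.length)
    · have hCA : size + u.2.1 > mx ∨
          (u.2.2.2.2 = true ∧ size + u.2.1 > cs ∧ ((done.drop start).map (·.1)) ≠ []) := by
        rcases hC with h | ⟨h1, h2, h3⟩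
        · exact Or.inl h
        · exact Or.inr ⟨h1, h2, hcur.2 h3⟩
      rw [if_pos hCA, if_pos hC]
      have hstep := ih (done ++ [u])
        (if start < done.length then cuts ++ [(start, done.length, u.2.2.2.1)] else cuts)
        done.length u.2.1 hall2 (by simp)
      have hdrop : (((done ++ [u]).drop done.length).map (·.1)) = [u.1] := by
        simp
      have hlen : (done ++ [u]).length = done.length + 1 := by simp
      have hinit : (List.map (pvRender all)
            (if start < done.length then cuts ++ [(start, done.length, u.2.2.2.1)] else cuts))
          = (if ((done.drop start).map (·.1)) ≠ [] then
              List.map (pvRender all) cuts ++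
                [PySem.Chars.join u.2.2.2.1 ((done.drop start).map (·.1))]
            else List.map (pvRender all) cuts) := by
        by_cases hlt : start < done.length
        · have hc := hcur.2 hlt
          simp only [hlt, if_pos, hc, ne_eq, not_false_iff, if_pos, List.map_append]
          congr 1
          simp only [List.map_cons, List.map_nil, pvRender]
          rw [show (all.drop start).take (done.length - start) = done.drop start from by
            rw [hall]; exact pv_slice_eq done (u :: us2) start hle]
        · have hc : ¬ ((done.drop start).map (·.1)) ≠ [] := fun h => hlt (hcur.1 h)
          simp [hlt, hc]
      rw [hdrop, hlen, hinit] at hstep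
      exact hstep
    · have hCA : ¬ (size + u.2.1 > mx ∨
          (u.2.2.2.2 = true ∧ size + u.2.1 > cs ∧ ((done.drop start).map (·.1)) ≠ [])) := by
        intro h
        apply hC
        rcases h with h | ⟨h1, h2, h3⟩
        · exact Or.inl h
        · exact Or.inr ⟨h1, h2, hcur.1 h3⟩
      rw [if_neg hCA, if_neg hC]
      have hstep := ih (done ++ [u]) cuts start (size + u.2.2.1) hall2 (by simp; omega)
      have hdrop : (((done ++ [u]).drop start).map (·.1)) =
          ((done.drop start).map (·.1)) ++ [u.1] := by
        rw [List.drop_append_of_le_length hle]; simp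
      have hlen : (done ++ [u]).length = done.length + 1 := by simp
      rw [hdrop, hlen] at hstep
      exact hstep

-- ===== VERDICT (by name: the statement is the Claim_ definition above) =====
theorem smart_chunk_text_py_spec : Claim_equal_smart_chunk_text_py := by
  intro text chunk_size max_chunk_size _
  unfold Spec_smart_chunk_text_py smart_chunk_text_py smart_chunk_text_py_alt
  by_cases ht : text = ""
  · simp [ht]
  · simp only [ht, if_false]
    rw [pv_outer_eq]
    have h := pv_rel chunk_size max_chunk_size (pvUnits max_chunk_size text.toList)
      (pvUnits max_chunk_size text.toList) [] [] 0 0 (by simp) (by simp)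
    simp only [List.map_nil, List.drop_nil, List.length_nil] at h
    obtain hA := congrArg (List.map String.ofList) h
    rw [show ((pvUnits max_chunk_size text.toList).zipIdx 0) =
      (pvUnits max_chunk_size text.toList).zipIdx from rfl] at hA
    rw [List.map_map] at hA
    convert hA using 2
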